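-- pv_equiv track=rewrite | github.com/permCoding/ege-21-22 | tasks/task24/24_36879.py | get
-- ===== SOURCE A (Python) =====
-- def get(s):
--     r = 0
--     for i in range(len(s)):
--         smb = s[i]
--         pos = s.rfind(smb)
--         dist = pos - i
--         r = max(r, dist)
--     return r
-- ===== SOURCE B (Python) =====
-- def get(s):
--     first = {}
--     last = {}
--     for i, c in enumerate(s):
--         if c not in first:
--             first[c] = i
--         last[c] = i
--     return max((last[c] - first[c] for c in first), default=0)
-- ===== Notes on version B (the rewrite author's own statement) =====
-- stated objective: faster
-- what changed: Replaces the per-position s.rfind inner scan with one pass recording each character's first and last index in dicts, then takes the max of last-first over distinct characters.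
import Mathlib
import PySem

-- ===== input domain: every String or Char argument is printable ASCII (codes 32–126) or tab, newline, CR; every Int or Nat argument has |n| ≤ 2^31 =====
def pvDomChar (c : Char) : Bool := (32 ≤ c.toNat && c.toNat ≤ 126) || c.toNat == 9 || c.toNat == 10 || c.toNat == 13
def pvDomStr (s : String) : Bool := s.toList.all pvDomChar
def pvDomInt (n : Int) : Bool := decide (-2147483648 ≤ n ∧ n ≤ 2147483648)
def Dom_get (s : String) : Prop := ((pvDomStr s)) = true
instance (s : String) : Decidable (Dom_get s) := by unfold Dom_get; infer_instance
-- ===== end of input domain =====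

-- B replaces A's per-position rfind scan by one pass recording first/last index per character (faster: one linear pass instead of a scan per position).

-- ===== PORT A =====
def get (s : String) : Int :=
  (PySem.List.pyRange 0 (PySem.Str.len s) 1).foldl
    (fun r i =>
      let smb := PySem.List.pyGetD s.toList i ' '
      let pos := PySem.Str.rfind s (String.ofList [smb])
      let dist := pos - i
      max r dist) 0

-- ===== PORT B =====
def bstep (fl : PySem.Dict Char Int × PySem.Dict Char Int) (p : Int × Char) :
    PySem.Dict Char Int × PySem.Dict Char Int :=
  ((if fl.1.contains p.2 then fl.1 else fl.1.insert p.2 p.1), fl.2.insert p.2 p.1)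

def get_alt (s : String) : Int :=
  let fl := (PySem.List.enumerate s.toList 0).foldl bstep (PySem.Dict.empty, PySem.Dict.empty)
  let vals := fl.1.keys.map (fun c => fl.2.getD c 0 - fl.1.getD c 0)
  match PySem.List.max? vals (fun x => x) with
  | some v => v
  | none => 0

-- ===== PRECONDITION & SPEC =====
def Spec_get (s : String) (out : Int) : Prop := out = get_alt s
instance (s : String) (out : Int) : Decidable (Spec_get s out) := by unfold Spec_get; infer_instance

-- ===== CLAIM (what is proved, stated in full; the proofs are below) =====
def Claim_equal_get : Prop := ∀ (s : String), Dom_get s → Spec_get s (get s)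

-- ===== LEMMAS AND PROOFS =====

-- first occurrence index of c in cs (proof helper)
def fo? : List Char → Char → Option Nat
  | [], _ => none
  | a :: t, c => if a = c then some 0 else (fo? t c).map (· + 1)

-- last occurrence index of c in cs (proof helper)
def lo? : List Char → Char → Option Nat
  | [], _ => none
  | a :: t, c =>
      match lo? t c with
      | some k => some (k + 1)
      | none => if a = c then some 0 else none

theorem fo?_isSome_iff (cs : List Char) (c : Char) : (fo? cs c).isSome ↔ c ∈ cs := by
  induction cs with
  | nil => simp [fo?]
  | cons a t ih =>
    by_cases h : a = c
    · simp [fo?, h]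
    · have h' : c ≠ a := fun hh => h hh.symm
      simp [fo?, h, h', ih]

theorem lo?_isSome_iff (cs : List Char) (c : Char) : (lo? cs c).isSome ↔ c ∈ cs := by
  induction cs with
  | nil => simp [lo?]
  | cons a t ih =>
    cases hlo : lo? t c with
    | some k => simp [lo?, hlo, ← ih]
    | none =>
      by_cases h : a = c
      · simp [lo?, hlo, h]
      · have h' : c ≠ a := fun hh => h hh.symm
        simp [lo?, hlo, h, h', ← ih]

theorem fo?_spec (cs : List Char) (c : Char) (k : Nat) (h : fo? cs c = some k) :
    k < cs.length ∧ cs[k]? = some c := by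
  induction cs generalizing k with
  | nil => simp [fo?] at h
  | cons a t ih =>
    by_cases hac : a = c
    · simp [fo?, hac] at h
      subst hac h
      simp
    · simp [fo?, hac] at h
      obtain ⟨k', hk', rfl⟩ := h
      obtain ⟨h1, h2⟩ := ih k' hk'
      refine ⟨by simp [List.length_cons]; omega, by simpa using h2⟩

theorem lo?_spec (cs : List Char) (c : Char) (k : Nat) (h : lo? cs c = some k) :
    k < cs.length ∧ cs[k]? = some c := by
  induction cs generalizing k with
  | nil => simp [lo?] at h
  | cons a t ih =>
    cases hlo : lo? t c with
    | some k' =>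
      simp [lo?, hlo] at h
      obtain ⟨h1, h2⟩ := ih k' hlo
      subst h
      refine ⟨by simp [List.length_cons]; omega, by simpa using h2⟩
    | none =>
      by_cases hac : a = c
      · simp [lo?, hlo, hac] at h
        subst hac h
        simp
      · simp [lo?, hlo, hac] at h

theorem fo?_le (cs : List Char) (c : Char) (k i : Nat) (h : fo? cs c = some k)
    (hi : cs[i]? = some c) : k ≤ i := by
  induction cs generalizing k i with
  | nil => simp at hi
  | cons a t ih =>
    by_cases hac : a = c
    · simp [fo?, hac] at h
      omega
    · simp [fo?, hac] at h
      obtain ⟨k', hk', rfl⟩ := h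
      cases i with
      | zero => simp at hi; exact absurd hi hac
      | succ i => simpa using ih k' i hk' (by simpa using hi)

theorem lo?_append_singleton (xs : List Char) (a c : Char) :
    lo? (xs ++ [a]) c = if a = c then some xs.length else lo? xs c := by
  induction xs with
  | nil => by_cases h : a = c <;> simp [lo?, h]
  | cons x t ih =>
    by_cases h : a = c
    · simp [h] at ih ⊢
      simp [lo?, ih]
    · simp [h] at ih ⊢
      cases hlo : lo? t c with
      | some k => simp [lo?, ih, hlo]
      | none => by_cases hxc : x = c <;> simp [lo?, ih, hlo, hxc]

theorem singleton_isPrefixOf (c : Char) (xs : List Char) :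
    [c].isPrefixOf xs = true ↔ xs[0]? = some c := by
  cases xs with
  | nil => simp [List.isPrefixOf]
  | cons a t =>
    have h1 : [c].isPrefixOf (a :: t) = (c == a && [].isPrefixOf t) := rfl
    rw [h1]
    constructor
    · intro hh
      simp at hh
      simp [hh]
    · intro hh
      simp at hh
      simp [hh]

theorem rfind_go_eq (cs : List Char) (c : Char) :
    ∀ j, j ≤ cs.length →
      PySem.Chars.rfind.go cs [c] j =
        (match lo? (cs.take (j + 1)) c with | some k => (k : Int) | none => -1) := by
  intro j
  induction j with
  | zero =>
    intro _
    rw [PySem.Chars.rfind.go.eq_def]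
    cases cs with
    | nil => simp [lo?, List.isPrefixOf]
    | cons a t =>
      have hp : ([c].isPrefixOf (a :: t) = true) ↔ a = c := by
        rw [singleton_isPrefixOf]; simp [eq_comm]
      by_cases h : a = c
      · rw [if_pos (hp.mpr h)]
        subst h
        simp [lo?]
      · rw [if_neg (fun hh => h (hp.mp hh))]
        simp [lo?, h]
  | succ j ih =>
    intro hj
    rw [PySem.Chars.rfind.go.eq_def]
    simp only []
    rcases Nat.lt_or_ge (j + 1) cs.length with hlt | hge
    · have htake : cs.take (j + 2) = cs.take (j + 1) ++ [cs[j + 1]] := by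
        rw [List.take_add_one]
        simp [List.getElem?_eq_getElem hlt]
      have hpre : [c].isPrefixOf (List.drop (j + 1) cs) = true ↔ cs[j + 1] = c := by
        rw [singleton_isPrefixOf]
        rw [List.getElem?_drop]
        simp [List.getElem?_eq_getElem hlt]
      by_cases hc : cs[j + 1] = c
      · rw [if_pos (hpre.mpr hc)]
        rw [htake, lo?_append_singleton, if_pos hc]
        have hlen : (cs.take (j + 1)).length = j + 1 := by
          rw [List.length_take]; omega
        simp [hlen]
      · rw [if_neg (by rw [hpre]; exact hc)]
        rw [htake, lo?_append_singleton, if_neg hc]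
        exact ih (by omega)
    · have hn : j + 1 = cs.length := by omega
      have hdrop : List.drop (j + 1) cs = [] := by
        apply List.drop_eq_nil_of_le; omega
      rw [hdrop]
      rw [if_neg (by simp [List.isPrefixOf])]
      have h2 : cs.take (j + 1) = cs := List.take_of_length_le (by omega)
      have h1 : cs.take (j + 2) = cs := List.take_of_length_le (by omega)
      rw [ih (by omega), h1, h2]

theorem rfind_single (cs : List Char) (c : Char) :
    PySem.Chars.rfind cs [c] =
      (match lo? cs c with | some k => (k : Int) | none => -1) := by
  show PySem.Chars.rfind.go cs [c] cs.length = _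
  rw [rfind_go_eq cs c cs.length (le_refl _)]
  rw [List.take_of_length_le (by omega)]

theorem rfind_single_some (cs : List Char) (c : Char) (k : Nat) (h : lo? cs c = some k) :
    PySem.Chars.rfind cs [c] = (k : Int) := by
  rw [rfind_single, h]

theorem foldB (cs : List Char) (s0 : Int) (f l : PySem.Dict Char Int) (c : Char) :
    (((PySem.List.enumerate cs s0).foldl bstep (f, l)).1.get? c
        = ((f.get? c).or ((fo? cs c).map (fun k => s0 + (k : Int)))))
    ∧ (((PySem.List.enumerate cs s0).foldl bstep (f, l)).2.get? c
        = ((lo? cs c).elim (l.get? c) (fun k => some (s0 + (k : Int))))) := by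
  induction cs generalizing s0 f l with
  | nil => simp [fo?, lo?, PySem.List.enumerate_nil]
  | cons a t ih =>
    rw [PySem.List.enumerate_cons]
    rw [List.foldl_cons]
    have hstep : bstep (f, l) (s0, a)
        = ((if f.contains a then f else f.insert a s0), l.insert a s0) := rfl
    rw [hstep]
    obtain ⟨ih1, ih2⟩ := ih (s0 + 1) (if f.contains a then f else f.insert a s0) (l.insert a s0)
    constructor
    · rw [ih1]
      by_cases hac : a = c
      · subst hac
        cases hcont : f.contains a with
        | true =>
          have : (f.get? a).isSome := by rw [← PySem.Dict.contains_eq_isSome_get?, hcont]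
          obtain ⟨v, hv⟩ := Option.isSome_iff_exists.mp this
          simp [hv]
        | false =>
          have hnone : f.get? a = none := by
            have hiso := PySem.Dict.contains_eq_isSome_get? f a
            rw [hcont] at hiso
            exact Option.not_isSome_iff_eq_none.mp (by rw [← hiso]; simp)
          simp [hnone, fo?]
      · have hget : (if f.contains a then f else f.insert a s0).get? c = f.get? c := by
          cases hcont : f.contains a with
          | true => simp
          | false =>
            have hca : ¬ (c = a) := fun hh => hac hh.symm
            simp [PySem.Dict.get?_insert, hca]
        rw [hget]
        cases hfo : fo? t c with
        | none => simp [fo?, hac, hfo]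
        | some k =>
          simp only [fo?, if_neg hac, hfo]
          have : s0 + 1 + (k : Int) = s0 + ((k + 1 : Nat) : Int) := by push_cast; ring
          simp [this]
    · rw [ih2]
      cases hlo : lo? t c with
      | some k =>
        simp only [lo?, hlo]
        have : s0 + 1 + (k : Int) = s0 + ((k + 1 : Nat) : Int) := by push_cast; ring
        simp [this]
      | none =>
        by_cases hac : a = c
        · subst hac
          simp only [lo?, hlo]
          rw [PySem.Dict.get?_insert]
          simp
        · simp only [lo?, hlo, if_neg hac]
          rw [PySem.Dict.get?_insert, if_neg (fun h => hac h.symm)]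
          simp

theorem foldl_max_le {α : Type} (xs : List α) (g : α → Int) (init b : Int)
    (h0 : init ≤ b) (h : ∀ x ∈ xs, g x ≤ b) :
    xs.foldl (fun r x => max r (g x)) init ≤ b := by
  induction xs generalizing init with
  | nil => exact h0
  | cons x t ih =>
    rw [List.foldl_cons]
    exact ih _ (max_le h0 (h x (by simp))) (fun y hy => h y (List.mem_cons_of_mem _ hy))

-- lookup facts for B's dicts, from empty start
theorem getF (cs : List Char) (c : Char) :
    ((PySem.List.enumerate cs 0).foldl bstep (PySem.Dict.empty, PySem.Dict.empty)).1.get? c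
      = (fo? cs c).map (fun k => (k : Int)) := by
  have := (foldB cs 0 PySem.Dict.empty PySem.Dict.empty c).1
  rw [this, PySem.Dict.get?_empty]
  simp

theorem getL (cs : List Char) (c : Char) :
    ((PySem.List.enumerate cs 0).foldl bstep (PySem.Dict.empty, PySem.Dict.empty)).2.get? c
      = (lo? cs c).map (fun k => (k : Int)) := by
  have := (foldB cs 0 PySem.Dict.empty PySem.Dict.empty c).2
  rw [this, PySem.Dict.get?_empty]
  cases hlo : lo? cs c <;> simp

theorem mem_keysF (cs : List Char) (c : Char) :
    c ∈ ((PySem.List.enumerate cs 0).foldl bstep (PySem.Dict.empty, PySem.Dict.empty)).1.keys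
      ↔ c ∈ cs := by
  rw [← PySem.Dict.contains_iff_mem_keys, PySem.Dict.contains_eq_isSome_get?, getF]
  rw [← fo?_isSome_iff]
  cases fo? cs c <;> simp

-- ===== VERDICT (by name: the statement is the Claim_ definition above) =====
theorem get_spec : Claim_equal_get := by
  intro s _
  unfold Spec_get
  set cs := s.toList with hcs
  -- notation for B's internals
  set FL := (PySem.List.enumerate cs 0).foldl bstep (PySem.Dict.empty, PySem.Dict.empty) with hFL
  have hBdef : get_alt s =
      (match PySem.List.max? (FL.1.keys.map (fun c => FL.2.getD c 0 - FL.1.getD c 0)) (fun x => x) with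
        | some v => v | none => 0) := rfl
  set vals := FL.1.keys.map (fun c => FL.2.getD c 0 - FL.1.getD c 0) with hvals
  -- the A-side body
  have hAdef : get s =
      (PySem.List.pyRange 0 (cs.length : Int) 1).foldl
        (fun r i => max r (PySem.Chars.rfind cs [PySem.List.pyGetD cs i ' '] - i)) 0 := by
    unfold _root_.get
    simp only [PySem.Str.len_eq, PySem.Str.rfind_eq, String.toList_ofList, ← hcs]
  -- for any c ∈ cs, its value (lo - fo) is in vals
  have hval_mem : ∀ c ∈ cs, ∀ k1 k2 : Nat, fo? cs c = some k1 → lo? cs c = some k2 →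
      ((k2 : Int) - (k1 : Int)) ∈ vals := by
    intro c hc k1 k2 h1 h2
    rw [hvals]
    refine List.mem_map.mpr ⟨c, (mem_keysF cs c).mpr hc, ?_⟩
    rw [PySem.Dict.getD_eq_get?_getD, PySem.Dict.getD_eq_get?_getD, getF, getL, h1, h2]
    rfl
  -- every element of vals has this form, and is nonnegative
  have hval_shape : ∀ v ∈ vals, ∃ c ∈ cs, ∃ k1 k2 : Nat,
      fo? cs c = some k1 ∧ lo? cs c = some k2 ∧ v = (k2 : Int) - (k1 : Int) ∧ k1 ≤ k2 ∧ k2 < cs.length := by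
    intro v hv
    rw [hvals] at hv
    obtain ⟨c, hck, hvc⟩ := List.mem_map.mp hv
    have hc : c ∈ cs := (mem_keysF cs c).mp hck
    obtain ⟨k1, h1⟩ := Option.isSome_iff_exists.mp ((fo?_isSome_iff cs c).mpr hc)
    obtain ⟨k2, h2⟩ := Option.isSome_iff_exists.mp ((lo?_isSome_iff cs c).mpr hc)
    obtain ⟨hk1len, hk1get⟩ := fo?_spec cs c k1 h1
    obtain ⟨hk2len, hk2get⟩ := lo?_spec cs c k2 h2
    refine ⟨c, hc, k1, k2, h1, h2, ?_, fo?_le cs c k1 k2 h1 hk2get, hk2len⟩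
    rw [← hvc, PySem.Dict.getD_eq_get?_getD, PySem.Dict.getD_eq_get?_getD, getF, getL, h1, h2]
    rfl
  rw [hAdef, hBdef]
  cases hmax : PySem.List.max? vals (fun x => x) with
  | none =>
    -- vals empty ⇒ cs has no characters ⇒ the range is empty too
    have hnil : vals = [] := (PySem.List.max?_eq_none_iff vals _).mp hmax
    have hcsnil : cs = [] := by
      cases hcase : cs with
      | nil => rfl
      | cons a t =>
        exfalso
        have hc : a ∈ cs := by rw [hcase]; simp
        obtain ⟨k1, h1⟩ := Option.isSome_iff_exists.mp ((fo?_isSome_iff cs a).mpr hc)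
        obtain ⟨k2, h2⟩ := Option.isSome_iff_exists.mp ((lo?_isSome_iff cs a).mpr hc)
        have := hval_mem a hc k1 k2 h1 h2
        rw [hnil] at this
        simp at this
    rw [hcsnil]
    simp [PySem.List.pyRange_one_eq_nil]
  | some m =>
    have hm_mem : m ∈ vals := PySem.List.max?_mem hmax
    have hm_max : ∀ y ∈ vals, y ≤ m := fun y hy => PySem.List.max?_isMax hmax y hy
    obtain ⟨cm, hcm, km1, km2, hm1, hm2, hmval, hmle, hmlen⟩ := hval_shape m hm_mem
    have hm_nonneg : 0 ≤ m := by rw [hmval]; omega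
    apply le_antisymm
    · -- A ≤ m
      apply foldl_max_le _ _ _ _ hm_nonneg
      intro i hi
      obtain ⟨hi0, hilt⟩ := PySem.List.mem_pyRange_one.mp hi
      obtain ⟨j, rfl⟩ := Int.eq_ofNat_of_zero_le hi0
      have hjlt : j < cs.length := by exact_mod_cast hilt
      rw [PySem.List.pyGetD_natCast]
      have hgetD : cs.getD j ' ' = cs[j] := List.getD_eq_getElem cs ' ' hjlt
      rw [hgetD]
      set c := cs[j] with hc
      have hmem : c ∈ cs := List.getElem_mem hjlt
      obtain ⟨k1, h1⟩ := Option.isSome_iff_exists.mp ((fo?_isSome_iff cs c).mpr hmem)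
      obtain ⟨k2, h2⟩ := Option.isSome_iff_exists.mp ((lo?_isSome_iff cs c).mpr hmem)
      rw [rfind_single_some cs c k2 h2]
      have hk1j : k1 ≤ j := fo?_le cs c k1 j h1 (List.getElem?_eq_getElem hjlt)
      have hle : ((k2 : Int) - (k1 : Int)) ≤ m := hm_max _ (hval_mem c hmem k1 k2 h1 h2)
      omega
    · -- m ≤ A
      have hkm1lt : km1 < cs.length := (fo?_spec cs cm km1 hm1).1
      have hkm1get : cs[km1]? = some cm := (fo?_spec cs cm km1 hm1).2
      have hrange : ((km1 : Int)) ∈ PySem.List.pyRange 0 (cs.length : Int) 1 := by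
        rw [PySem.List.mem_pyRange_one]
        constructor
        · exact_mod_cast Int.natCast_nonneg km1
        · exact_mod_cast hkm1lt
      have := (PySem.List.le_foldl_max_int (PySem.List.pyRange 0 (cs.length : Int) 1)
        (fun i => PySem.Chars.rfind cs [PySem.List.pyGetD cs i ' '] - i) 0).2 _ hrange
      simp only at this
      rw [PySem.List.pyGetD_natCast] at this
      have hgetD : cs.getD km1 ' ' = cm := by
        rw [List.getD_eq_getElem cs ' ' hkm1lt]
        exact Option.some_injective _ ((List.getElem?_eq_getElem hkm1lt).symm.trans hkm1get)
      rw [hgetD, rfind_single_some cs cm km2 hm2] at this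
      rw [hmval]
      omega
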